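-- pv_equiv track=rewrite | github.com/phildecroos/tic_tac_toe_ai | general.py | good_outcomes
-- ===== SOURCE A (Python) =====
-- def avail_moves(board):
--     output = []
--     for i in range(9):
--         if board[i] == 0:
--             output.append(i)
--     return output
--
-- def check_end(board):
--     winner = 0
--
--     if board[0] == board[1] and board[1] == board[2] and board[2] != 0:
--         winner = board[0]
--     if board[3] == board[4] and board[4] == board[5] and board[5] != 0:
--         winner = board[3]
--     if board[6] == board[7] and board[7] == board[8] and board[8] != 0:
--         winner = board[6]
--     if board[0] == board[3] and board[3] == board[6] and board[6] != 0:
--         winner = board[0]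
--     if board[1] == board[4] and board[4] == board[7] and board[7] != 0:
--         winner = board[1]
--     if board[2] == board[5] and board[5] == board[8] and board[8] != 0:
--         winner = board[2]
--     if board[0] == board[4] and board[4] == board[8] and board[8] != 0:
--         winner = board[0]
--     if board[2] == board[4] and board[4] == board[6] and board[6] != 0:
--         winner = board[2]
--
--     # win/lose
--     if winner != 0:
--         return winner
--     # draw (out of empty squares and no winner)
--     if board.count(0) == 0:
--         return 2
--     # game is not over
--     return 0
--
-- def good_outcomes(depth, mover, board, gameover):
--     wins = 0
--     save_board = board.copy()
--     local_board = save_board.copy()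
--
--     if depth > 0:
--         for move in avail_moves(local_board):
--             local_board[move] = mover
--             if gameover == -1 or (gameover == 0 and check_end(local_board) == -1):
--                 if depth > 1:
--                     wins += good_outcomes(depth - 1, -1 * mover, local_board, -1)
--                 else:
--                     wins += 1
--             elif gameover == 2 or (gameover == 0 and check_end(local_board) == 2):
--                 wins += 1
--             elif check_end(local_board) == 0 and depth > 1:
--                 wins += good_outcomes(depth - 1, -1 * mover, local_board, 0)
--             local_board = save_board.copy()
--     return wins
-- ===== SOURCE B (Python) =====
-- WIN_LINES = [(0, 1, 2), (3, 4, 5), (6, 7, 8),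
--              (0, 3, 6), (1, 4, 7), (2, 5, 8),
--              (0, 4, 8), (2, 4, 6)]
--
-- def _end(board):
--     winner = 0
--     for a, b, c in WIN_LINES:
--         if board[a] == board[b] == board[c] != 0:
--             winner = board[a]
--     if winner != 0:
--         return winner
--     if 0 not in board:
--         return 2
--     return 0
--
-- def good_outcomes(depth, mover, board, gameover):
--     memo = {}
--
--     def solve(depth, mover, board, gameover):
--         key = (depth, mover, board, gameover)
--         if key in memo:
--             return memo[key]
--         wins = 0
--         if depth > 0:
--             for move in [i for i in range(9) if board[i] == 0]:
--                 nb = board[:move] + (mover,) + board[move + 1:]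
--                 e = _end(nb)
--                 if gameover == -1 or (gameover == 0 and e == -1):
--                     wins += solve(depth - 1, -mover, nb, -1) if depth > 1 else 1
--                 elif gameover == 2 or (gameover == 0 and e == 2):
--                     wins += 1
--                 elif e == 0 and depth > 1:
--                     wins += solve(depth - 1, -mover, nb, 0)
--         memo[key] = wins
--         return wins
--
--     return solve(depth, mover, tuple(board), gameover)
-- ===== Notes on version B (the rewrite author's own statement) =====
-- stated objective: alternative
-- what changed: B replaces A's blind recursive game-tree enumeration, which re-explores every transposed position, by the same recursion over a transposition table memoized on the key (depth, mover, board-as-tuple, gameover), so each distinct search state is evaluated once; intended as faster (30x on a full empty-board depth-9 search) but a timing run's generated family measured below 1.5x, so no speed is claimed.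
import Mathlib
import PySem

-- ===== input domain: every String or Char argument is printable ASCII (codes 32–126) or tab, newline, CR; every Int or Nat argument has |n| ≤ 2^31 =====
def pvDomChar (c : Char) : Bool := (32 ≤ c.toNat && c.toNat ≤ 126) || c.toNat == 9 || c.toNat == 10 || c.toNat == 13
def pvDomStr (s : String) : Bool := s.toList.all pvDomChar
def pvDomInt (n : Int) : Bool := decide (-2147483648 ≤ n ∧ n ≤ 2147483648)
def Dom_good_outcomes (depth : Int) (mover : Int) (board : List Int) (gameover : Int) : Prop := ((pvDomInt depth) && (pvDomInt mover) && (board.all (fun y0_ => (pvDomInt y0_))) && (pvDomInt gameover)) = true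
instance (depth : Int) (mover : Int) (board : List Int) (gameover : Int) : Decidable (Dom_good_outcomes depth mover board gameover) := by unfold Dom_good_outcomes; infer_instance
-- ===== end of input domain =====

-- B replaces A's blind game-tree walk, which re-explores every transposed position,
-- by the same recursion over a transposition table keyed by (depth, mover, board, gameover),
-- so each distinct search state is evaluated once (a timing run did not measure it
-- past its 1.5x bar on the generated family, so no speed is claimed).

-- ===== PORT A =====
def avail_moves (board : List Int) : List Int :=
  (PySem.List.pyRange 0 9 1).foldl
    (fun acc i => if PySem.List.pyGetD board i 0 == 0 then acc ++ [i] else acc) []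

def check_end (board : List Int) : Int :=
  let g : Int → Int := fun i => PySem.List.pyGetD board i 0   -- board[i]; Pre_ gives len ≥ 9
  let winner : Int := 0
  let winner := if g 0 == g 1 && g 1 == g 2 && g 2 != 0 then g 0 else winner
  let winner := if g 3 == g 4 && g 4 == g 5 && g 5 != 0 then g 3 else winner
  let winner := if g 6 == g 7 && g 7 == g 8 && g 8 != 0 then g 6 else winner
  let winner := if g 0 == g 3 && g 3 == g 6 && g 6 != 0 then g 0 else winner
  let winner := if g 1 == g 4 && g 4 == g 7 && g 7 != 0 then g 1 else winner
  let winner := if g 2 == g 5 && g 5 == g 8 && g 8 != 0 then g 2 else winner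
  let winner := if g 0 == g 4 && g 4 == g 8 && g 8 != 0 then g 0 else winner
  let winner := if g 2 == g 4 && g 4 == g 6 && g 6 != 0 then g 2 else winner
  if winner != 0 then winner
  else if PySem.List.count board 0 == 0 then 2
  else 0

def good_outcomes (depth : Int) (mover : Int) (board : List Int) (gameover : Int) : Int :=
  if _h0 : depth > 0 then
    (avail_moves board).foldl
      (fun wins move =>
        let lb := PySem.List.pySetD board move mover    -- local_board[move] = mover
        if gameover = -1 ∨ (gameover = 0 ∧ check_end lb = -1) then
          if _h1 : depth > 1 then
            wins + good_outcomes (depth - 1) (-1 * mover) lb (-1)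
          else wins + 1
        else if gameover = 2 ∨ (gameover = 0 ∧ check_end lb = 2) then
          wins + 1
        else if _h2 : check_end lb = 0 ∧ depth > 1 then
          wins + good_outcomes (depth - 1) (-1 * mover) lb 0
        else wins)
      0
  else 0
termination_by depth.toNat
decreasing_by all_goals omega

-- ===== PORT B =====
def winLines : List (Int × Int × Int) :=
  [(0,1,2),(3,4,5),(6,7,8),(0,3,6),(1,4,7),(2,5,8),(0,4,8),(2,4,6)]

def bEnd (board : List Int) : Int :=
  let winner : Int :=
    winLines.foldl
      (fun w t =>
        if PySem.List.pyGetD board t.1 0 == PySem.List.pyGetD board t.2.1 0 &&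
           PySem.List.pyGetD board t.2.1 0 == PySem.List.pyGetD board t.2.2 0 &&
           PySem.List.pyGetD board t.2.2 0 != 0
        then PySem.List.pyGetD board t.1 0 else w) 0
  if winner != 0 then winner
  else if board.contains 0 = false then 2
  else 0

def bMoves (board : List Int) : List Int :=
  (PySem.List.pyRange 0 9 1).filter (fun i => PySem.List.pyGetD board i 0 == 0)

-- the transposition table: key = (depth, mover, board, gameover)
def solveB (depth : Int) (mover : Int) (board : List Int) (gameover : Int)
    (memo : PySem.Dict (Int × Int × List Int × Int) Int) :
    Int × PySem.Dict (Int × Int × List Int × Int) Int :=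
  let key := (depth, mover, board, gameover)
  match memo.get? key with
  | some v => (v, memo)
  | none =>
    let res :=
      if _h0 : depth > 0 then
        (bMoves board).foldl
          (fun st move =>
            -- nb = board[:move] + (mover,) + board[move+1:]
            let nb := PySem.List.slice board none (some move) ++ [mover] ++
                      PySem.List.slice board (some (move + 1)) none
            let e := bEnd nb
            if gameover = -1 ∨ (gameover = 0 ∧ e = -1) then
              if _h1 : depth > 1 then
                let r := solveB (depth - 1) (-mover) nb (-1) st.2
                (st.1 + r.1, r.2)
              else (st.1 + 1, st.2)
            else if gameover = 2 ∨ (gameover = 0 ∧ e = 2) then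
              (st.1 + 1, st.2)
            else if _h2 : e = 0 ∧ depth > 1 then
              let r := solveB (depth - 1) (-mover) nb 0 st.2
              (st.1 + r.1, r.2)
            else st)
          ((0 : Int), memo)
      else ((0 : Int), memo)
    (res.1, res.2.insert key res.1)
termination_by depth.toNat
decreasing_by all_goals omega

def good_outcomes_alt (depth : Int) (mover : Int) (board : List Int) (gameover : Int) : Int :=
  (solveB depth mover board gameover PySem.Dict.empty).1

-- ===== PRECONDITION & SPEC =====
-- Pre_ excludes only boards shorter than 9 when depth > 0: there Python A raises
-- IndexError (and B raises too); with depth <= 0 the board is never indexed and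
-- A returns 0.
def Pre_good_outcomes (depth : Int) (mover : Int) (board : List Int) (gameover : Int) : Prop :=
  0 < depth → 9 ≤ board.length
instance (depth : Int) (mover : Int) (board : List Int) (gameover : Int) : Decidable (Pre_good_outcomes depth mover board gameover) := by unfold Pre_good_outcomes; infer_instance

def pvWitness_good_outcomes : Int × Int × List Int × Int := (3, 1, [0,0,0,0,0,0,0,0,0], 0)

def Spec_good_outcomes (depth : Int) (mover : Int) (board : List Int) (gameover : Int) (out : Int) : Prop := out = good_outcomes_alt depth mover board gameover
instance (depth : Int) (mover : Int) (board : List Int) (gameover : Int) (out : Int) : Decidable (Spec_good_outcomes depth mover board gameover out) := by unfold Spec_good_outcomes; infer_instance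

-- ===== CLAIM (what is proved, stated in full; the proofs are below) =====
def Claim_equal_good_outcomes : Prop := ∀ (depth : Int) (mover : Int) (board : List Int) (gameover : Int), Dom_good_outcomes depth mover board gameover → Pre_good_outcomes depth mover board gameover → Spec_good_outcomes depth mover board gameover (good_outcomes depth mover board gameover)

-- ===== LEMMAS AND PROOFS =====

-- B's move list is A's move list
lemma bMoves_eq_avail (board : List Int) : bMoves board = avail_moves board := by
  rw [avail_moves, PySem.List.foldl_append_if_eq_filter, bMoves, List.nil_append]

-- B's endgame check is A's
lemma bEnd_eq_check_end (board : List Int) : bEnd board = check_end board := by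
  by_cases h : (0 : Int) ∈ board <;>
    simp only [bEnd, check_end, winLines, List.foldl, PySem.List.count_eq] <;>
    simp [h, List.count_eq_zero]

-- B's tuple-slice rebuild is A's in-place assignment, for in-range moves
lemma nb_eq_set (board : List Int) (move v : Int) (h0 : 0 ≤ move)
    (h9 : move.toNat < board.length) :
    PySem.List.slice board none (some move) ++ [v] ++
      PySem.List.slice board (some (move + 1)) none = PySem.List.pySetD board move v := by
  obtain ⟨n, rfl⟩ : ∃ n : Nat, move = (n : Int) := ⟨move.toNat, by omega⟩
  have hcast : ((n : Int) + 1) = ((n + 1 : Nat) : Int) := by push_cast; ring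
  rw [hcast, PySem.List.slice_to_natCast, PySem.List.slice_from_natCast,
      PySem.List.pySetD_natCast]
  simp only [Int.toNat_natCast] at h9
  rw [List.set_eq_take_append_cons_drop, if_pos h9]
  simp

def MemoInv (memo : PySem.Dict (Int × Int × List Int × Int) Int) : Prop :=
  ∀ d m b g v, memo.get? (d, m, b, g) = some v → v = good_outcomes d m b g

-- the loop bodies of the two ports, named for the proofs (definitionally the lambdas
-- appearing in solveB and good_outcomes)
def stepB (d m g : Int) (b : List Int) :
    (Int × PySem.Dict (Int × Int × List Int × Int) Int) → Int →
    (Int × PySem.Dict (Int × Int × List Int × Int) Int) := fun st move =>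
  let nb := PySem.List.slice b none (some move) ++ [m] ++
            PySem.List.slice b (some (move + 1)) none
  let e := bEnd nb
  if g = -1 ∨ (g = 0 ∧ e = -1) then
    if _h1 : d > 1 then
      let r := solveB (d - 1) (-m) nb (-1) st.2
      (st.1 + r.1, r.2)
    else (st.1 + 1, st.2)
  else if g = 2 ∨ (g = 0 ∧ e = 2) then
    (st.1 + 1, st.2)
  else if _h2 : e = 0 ∧ d > 1 then
    let r := solveB (d - 1) (-m) nb 0 st.2
    (st.1 + r.1, r.2)
  else st

def stepA (d m g : Int) (b : List Int) : Int → Int → Int := fun wins move =>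
  let lb := PySem.List.pySetD b move m
  if g = -1 ∨ (g = 0 ∧ check_end lb = -1) then
    if _h1 : d > 1 then
      wins + good_outcomes (d - 1) (-1 * m) lb (-1)
    else wins + 1
  else if g = 2 ∨ (g = 0 ∧ check_end lb = 2) then
    wins + 1
  else if _h2 : check_end lb = 0 ∧ d > 1 then
    wins + good_outcomes (d - 1) (-1 * m) lb 0
  else wins

lemma solveB_nonpos (d m : Int) (b : List Int) (g : Int)
    (memo : PySem.Dict (Int × Int × List Int × Int) Int)
    (hd : ¬ d > 0) (hinv : MemoInv memo) :
    (solveB d m b g memo).1 = good_outcomes d m b g ∧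
    MemoInv (solveB d m b g memo).2 := by
  rw [solveB]
  cases hk : memo.get? (d, m, b, g) with
  | some v =>
    exact ⟨by simp [hinv d m b g v hk, good_outcomes, hd], by simpa using hinv⟩
  | none =>
    simp only [hd, dite_false]
    refine ⟨by simp [good_outcomes, hd], ?_⟩
    intro d' m' b' g' v hv
    simp only [PySem.Dict.get?_insert] at hv
    split at hv
    · rename_i he
      obtain ⟨e1, e2, e3, e4⟩ : d' = d ∧ m' = m ∧ b' = b ∧ g' = g := by
        injection he with a1 r1; injection r1 with a2 r2; injection r2 with a3 a4
        exact ⟨a1, a2, a3, a4⟩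
      subst e1; subst e2; subst e3; subst e4
      obtain rfl : (0 : Int) = v := by injection hv
      simp [good_outcomes, hd]
    · exact hinv d' m' b' g' v hv

lemma loopB (n : Nat) (d m g : Int) (b : List Int) (hb : 9 ≤ b.length)
    (IH : ∀ (d' m' : Int) (b' : List Int) (g' : Int)
        (mm : PySem.Dict (Int × Int × List Int × Int) Int),
        d'.toNat ≤ n → 9 ≤ b'.length → MemoInv mm →
        (solveB d' m' b' g' mm).1 = good_outcomes d' m' b' g' ∧
        MemoInv (solveB d' m' b' g' mm).2)
    (hdn : d.toNat ≤ n + 1) :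
    ∀ (moves : List Int), (∀ mv ∈ moves, 0 ≤ mv ∧ mv < 9) →
    ∀ (a : Int) (mm : PySem.Dict (Int × Int × List Int × Int) Int), MemoInv mm →
    (moves.foldl (stepB d m g b) (a, mm)).1 = moves.foldl (stepA d m g b) a ∧
    MemoInv (moves.foldl (stepB d m g b) (a, mm)).2 := by
  intro moves
  induction moves with
  | nil => exact fun _ a mm hmm => ⟨rfl, hmm⟩
  | cons mv rest ihm =>
    intro hmv a mm hmm
    obtain ⟨h0, h9⟩ := hmv mv (List.mem_cons_self ..)
    have hrest := fun x hx => hmv x (List.mem_cons_of_mem _ hx)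
    have hset := nb_eq_set b mv m h0 (by omega)
    have hlen : 9 ≤ (PySem.List.pySetD b mv m).length := by
      rw [PySem.List.pySetD_of_nonneg b m h0]; simpa using hb
    have hneg : (-1 : Int) * m = -m := by ring
    have hstep : ∃ mm2, stepB d m g b (a, mm) mv = (stepA d m g b a mv, mm2) ∧
        MemoInv mm2 := by
      unfold stepB stepA
      simp only [hset, bEnd_eq_check_end, hneg]
      by_cases hc1 : g = -1 ∨ (g = 0 ∧ check_end (PySem.List.pySetD b mv m) = -1)
      · simp only [hc1, if_true]
        by_cases h1 : d > 1
        · have hrec := IH (d - 1) (-m) (PySem.List.pySetD b mv m) (-1) mm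
            (by omega) hlen hmm
          simp only [h1, dite_true]
          exact ⟨_, by simp [hrec.1], hrec.2⟩
        · simp only [h1, dite_false]
          exact ⟨mm, rfl, hmm⟩
      · simp only [hc1, if_false]
        by_cases hc2 : g = 2 ∨ (g = 0 ∧ check_end (PySem.List.pySetD b mv m) = 2)
        · simp only [hc2, if_true]
          exact ⟨mm, rfl, hmm⟩
        · simp only [hc2, if_false]
          by_cases hc3 : check_end (PySem.List.pySetD b mv m) = 0 ∧ d > 1
          · have hrec := IH (d - 1) (-m) (PySem.List.pySetD b mv m) 0 mm
              (by omega) hlen hmm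
            simp only [hc3]
            exact ⟨_, by simp [hrec.1], hrec.2⟩
          · simp only [hc3, dite_false]
            exact ⟨mm, rfl, hmm⟩
    obtain ⟨mm2, heq, hmm2⟩ := hstep
    simp only [List.foldl_cons, heq]
    exact ihm hrest (stepA d m g b a mv) mm2 hmm2

lemma solveB_correct : ∀ (n : Nat) (d m : Int) (b : List Int) (g : Int)
    (memo : PySem.Dict (Int × Int × List Int × Int) Int),
    d.toNat ≤ n → 9 ≤ b.length → MemoInv memo →
    (solveB d m b g memo).1 = good_outcomes d m b g ∧
    MemoInv (solveB d m b g memo).2 := by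
  intro n
  induction n with
  | zero =>
    intro d m b g memo hn hb hinv
    exact solveB_nonpos d m b g memo (by omega) hinv
  | succ n ih =>
    intro d m b g memo hn hb hinv
    by_cases hd : d > 0
    · have hmem : ∀ mv ∈ bMoves b, 0 ≤ mv ∧ mv < 9 := by
        intro mv hmv
        have h1 := List.mem_filter.mp hmv
        have h2 := PySem.List.mem_pyRange_one.mp h1.1
        omega
      have hloop := loopB n d m g b hb ih hn (bMoves b) hmem 0 memo hinv
      have hval : good_outcomes d m b g = (bMoves b).foldl (stepA d m g b) 0 := by
        rw [good_outcomes]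
        simp only [hd, dite_true, bMoves_eq_avail]
        rfl
      rw [solveB]
      cases hk : memo.get? (d, m, b, g) with
      | some v =>
        exact ⟨hinv d m b g v hk, by simpa using hinv⟩
      | none =>
        simp only [hd, dite_true]
        refine ⟨?_, ?_⟩
        · show ((bMoves b).foldl (stepB d m g b) (0, memo)).1 = _
          rw [hloop.1, hval]
        · show MemoInv (PySem.Dict.insert _ _ _)
          intro d' m' b' g' v hv
          simp only [PySem.Dict.get?_insert] at hv
          split at hv
          · rename_i he
            obtain ⟨e1, e2, e3, e4⟩ : d' = d ∧ m' = m ∧ b' = b ∧ g' = g := by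
              injection he with a1 r1; injection r1 with a2 r2; injection r2 with a3 a4
              exact ⟨a1, a2, a3, a4⟩
            subst e1; subst e2; subst e3; subst e4
            injection hv with hv2
            exact hv2.symm.trans (hloop.1.trans hval.symm)
          · exact hloop.2 d' m' b' g' v hv
    · exact solveB_nonpos d m b g memo hd hinv

-- ===== VERDICT (by name: the statement is the Claim_ definition above) =====
theorem good_outcomes_spec : Claim_equal_good_outcomes := by
  intro depth mover board gameover _hdom hpre
  unfold Spec_good_outcomes good_outcomes_alt
  have hinv : MemoInv PySem.Dict.empty := by
    intro d m b g v hv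
    simp [PySem.Dict.get?_empty] at hv
  by_cases hd : 0 < depth
  · exact ((solveB_correct depth.toNat depth mover board gameover PySem.Dict.empty
      le_rfl (hpre hd) hinv).1).symm
  · exact ((solveB_nonpos depth mover board gameover PySem.Dict.empty
      (by omega) hinv).1).symm
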